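-- pv_equiv track=rewrite | github.com/hyunjune-lee/python_algorithm_interview | Temp Storage/2021_Algorithm/10-11_Dynamic Programing/유전자 염기서열 유사성.py | gene_similarity
-- ===== SOURCE A (Python) =====
-- def gene_similarity(gap_penalty, mismatch_penalty, x, y):
--     m = len(x)
--     n = len(y)
--     a = [[0 for _ in range(n + 1)] for _ in range(m + 1)]
--     for i in range(m + 1):
--         a[i][0] = i * gap_penalty
--     for j in range(n + 1):
--         a[0][j] = j * gap_penalty
--     for i in range(1, m + 1):
--         for j in range(1, n + 1):
--             match_penalty = 0 if x[i - 1] == y[j - 1] else mismatch_penalty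
--             a[i][j] = min(a[i - 1][j - 1] + match_penalty, a[i - 1][j] + gap_penalty, a[i][j - 1] + gap_penalty)
--
--     return a[m][n]
-- ===== SOURCE B (Python) =====
-- def gene_similarity(gap_penalty, mismatch_penalty, x, y):
--     # Top-down, demand-driven evaluation: a DFS from the goal cell (m, n)
--     # discovers the subproblems it depends on, they are then ordered by
--     # dependency rank i + j and evaluated once each into a memo dict.
--     m, n = len(x), len(y)
--     target = (m, n)
--     seen = {target}
--     stack = [target]
--     order = []
--     while stack:
--         i, j = stack.pop()
--         order.append((i, j))
--         if 0 < i and 0 < j and i <= m and j <= n: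
--             for d in ((i - 1, j - 1), (i - 1, j), (i, j - 1)):
--                 if d not in seen:
--                     seen.add(d)
--                     stack.append(d)
--     order.sort(key=lambda c: c[0] + c[1])
--     memo = {}
--     for i, j in order:
--         if i == 0:
--             v = j * gap_penalty
--         elif j == 0:
--             v = i * gap_penalty
--         else:
--             v = min(memo[(i - 1, j - 1)]
--                     + (0 if x[i - 1] == y[j - 1] else mismatch_penalty),
--                     memo[(i - 1, j)] + gap_penalty,
--                     memo[(i, j - 1)] + gap_penalty)
--         memo[(i, j)] = v
--     return memo[target]
-- ===== Notes on version B (the rewrite author's own statement) =====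
-- stated objective: alternative
-- what changed: Replaces A's bottom-up row-by-row fill of a 2-D table with a top-down demand-driven scheme: an explicit-stack DFS from the goal cell collects the needed subproblems, they are topologically ordered by dependency rank i+j, and one pass evaluates them into a memo dict.
import Mathlib
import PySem

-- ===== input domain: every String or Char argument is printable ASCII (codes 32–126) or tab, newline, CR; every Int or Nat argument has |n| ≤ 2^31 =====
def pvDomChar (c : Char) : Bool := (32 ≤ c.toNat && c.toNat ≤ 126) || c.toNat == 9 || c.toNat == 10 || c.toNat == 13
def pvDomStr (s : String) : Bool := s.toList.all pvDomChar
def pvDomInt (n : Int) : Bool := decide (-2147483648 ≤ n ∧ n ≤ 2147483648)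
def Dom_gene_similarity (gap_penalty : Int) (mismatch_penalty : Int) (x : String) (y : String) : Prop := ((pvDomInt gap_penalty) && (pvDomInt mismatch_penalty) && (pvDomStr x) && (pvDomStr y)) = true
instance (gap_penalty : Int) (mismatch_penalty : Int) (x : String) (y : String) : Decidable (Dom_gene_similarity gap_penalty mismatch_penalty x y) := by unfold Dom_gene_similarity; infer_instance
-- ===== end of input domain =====

-- B replaces A's bottom-up row-by-row fill of a 2-D table by a top-down demand-driven
-- scheme: an explicit-stack DFS from the goal cell collects the needed subproblems,
-- sorts them by dependency rank i+j, and evaluates them once each into a memo dict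
-- (objective: alternative decomposition, same asymptotic cost up to the sort).

-- ===== PORT A =====
-- a[i][j] read/write on the 2D list; every index A uses is in range, so getD defaults are never hit.
def tget (a : List (List Int)) (i j : Nat) : Int := (a.getD i []).getD j 0
def tset (a : List (List Int)) (i j : Nat) (v : Int) : List (List Int) :=
  a.set i ((a.getD i []).set j v)

def gene_similarity (gap_penalty : Int) (mismatch_penalty : Int) (x : String) (y : String) : Int :=
  let xs := x.toList
  let ys := y.toList
  let m := xs.length
  let n := ys.length
  -- a = [[0 for _ in range(n+1)] for _ in range(m+1)]
  let a0 : List (List Int) := (List.range (m+1)).map (fun _ => (List.range (n+1)).map (fun _ => (0:Int)))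
  -- for i in range(m+1): a[i][0] = i * gap_penalty
  let a1 := (List.range (m+1)).foldl (fun a i => tset a i 0 ((i : Int) * gap_penalty)) a0
  -- for j in range(n+1): a[0][j] = j * gap_penalty
  let a2 := (List.range (n+1)).foldl (fun a j => tset a 0 j ((j : Int) * gap_penalty)) a1
  -- nested loops; Python's three-argument min of ints equals the nested binary min
  let a3 := (List.range' 1 m).foldl (fun a i =>
    (List.range' 1 n).foldl (fun a j =>
      let match_penalty : Int := if xs.getD (i-1) ' ' = ys.getD (j-1) ' ' then 0 else mismatch_penalty
      tset a i j (min (min (tget a (i-1) (j-1) + match_penalty)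
                           (tget a (i-1) j + gap_penalty))
                      (tget a i (j-1) + gap_penalty))) a) a2
  tget a3 m n

-- ===== PORT B =====
-- seen is a Python set used only for membership and add; kept as the list of its
-- distinct elements in insertion order (PySem.Set discipline), stack/order are lists.

-- the grid [0..m] x [0..n]; used ONLY by the termination measure of dfsGen below
def gridCells (m n : Nat) : List (Nat × Nat) :=
  (List.range (m+1)).flatMap (fun i => (List.range (n+1)).map (fun j => (i, j)))

def unseenCount (m n : Nat) (seen : List (Nat × Nat)) : Nat :=
  ((gridCells m n).filter (fun c => !(seen.contains c))).length

-- 'if d not in seen: seen.add(d); stack.append(d)' (state = (stack, seen); list head = top of stack)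
def pushStep (s : List (Nat × Nat) × List (Nat × Nat)) (d : Nat × Nat) :
    List (Nat × Nat) × List (Nat × Nat) :=
  if d ∈ s.2 then s else (d :: s.1, s.2 ++ [d])

theorem unseenCount_pushStep_le (m n : Nat) (s : List (Nat × Nat) × List (Nat × Nat)) (d : Nat × Nat) :
    unseenCount m n (pushStep s d).2 ≤ unseenCount m n s.2 := by
  unfold pushStep
  split
  · exact le_refl _
  · simp only [unseenCount, ← List.countP_eq_length_filter]
    apply List.countP_mono_left
    intro a _ h
    simp only [Bool.not_eq_eq_eq_not, Bool.not_true, List.contains_eq_mem] at h ⊢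
    simp only [List.mem_append, List.mem_singleton, decide_eq_false_iff_not] at h ⊢
    intro hc
    exact h (Or.inl hc)

theorem countP_lt_of_mem {α : Type} (l : List α) (p q : α → Bool)
    (hmono : ∀ a, p a = true → q a = true) (d : α) (hd : d ∈ l)
    (hq : q d = true) (hp : p d = false) : l.countP p < l.countP q := by
  induction l with
  | nil => simp at hd
  | cons a l ih =>
    rw [List.countP_cons, List.countP_cons]
    have hle : l.countP p ≤ l.countP q := List.countP_mono_left (fun a _ h => hmono a h)
    rcases List.mem_cons.mp hd with rfl | ha
    · rw [hp, hq]
      simpa using Nat.lt_succ_of_le hle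
    · have := ih ha
      have h2 : (if p a = true then 1 else 0) ≤ (if q a = true then 1 else 0) := by
        cases hpa : p a
        · simp
        · rw [hmono a hpa]
      omega

theorem unseenCount_push_lt (m n : Nat) (seen : List (Nat × Nat)) (d : Nat × Nat)
    (hg : d ∈ gridCells m n) (hd : d ∉ seen) :
    unseenCount m n (seen ++ [d]) < unseenCount m n seen := by
  unfold unseenCount
  simp only [← List.countP_eq_length_filter]
  refine countP_lt_of_mem _ _ _ ?_ d hg ?_ ?_
  · intro a h
    simp only [Bool.not_eq_eq_eq_not, Bool.not_true, List.contains_eq_mem,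
      decide_eq_false_iff_not, List.mem_append, List.mem_singleton] at h ⊢
    intro hc
    exact h (Or.inl hc)
  · simp [List.contains_eq_mem, hd]
  · simp [List.contains_eq_mem]

theorem mem_gridCells (m n a b : Nat) : (a, b) ∈ gridCells m n ↔ a ≤ m ∧ b ≤ n := by
  simp only [gridCells, List.mem_flatMap, List.mem_map, List.mem_range, Prod.mk.injEq]
  constructor
  · rintro ⟨i, hi, j, hj, rfl, rfl⟩; omega
  · rintro ⟨ha, hb⟩; exact ⟨a, by omega, b, by omega, rfl, rfl⟩

theorem push3_dec (m n : Nat) (rest seen : List (Nat × Nat)) (d1 d2 d3 : Nat × Nat)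
    (h1 : d1 ∈ gridCells m n) (h2 : d2 ∈ gridCells m n) (h3 : d3 ∈ gridCells m n) :
    unseenCount m n (pushStep (pushStep (pushStep (rest, seen) d1) d2) d3).2 < unseenCount m n seen ∨
      (pushStep (pushStep (pushStep (rest, seen) d1) d2) d3) = (rest, seen) := by
  by_cases hd1 : d1 ∈ seen
  · rw [show pushStep (rest, seen) d1 = (rest, seen) from if_pos hd1]
    by_cases hd2 : d2 ∈ seen
    · rw [show pushStep (rest, seen) d2 = (rest, seen) from if_pos hd2]
      by_cases hd3 : d3 ∈ seen
      · rw [show pushStep (rest, seen) d3 = (rest, seen) from if_pos hd3]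
        exact Or.inr rfl
      · left
        rw [show pushStep (rest, seen) d3 = (d3 :: rest, seen ++ [d3]) from if_neg hd3]
        exact unseenCount_push_lt m n seen d3 h3 hd3
    · left
      rw [show pushStep (rest, seen) d2 = (d2 :: rest, seen ++ [d2]) from if_neg hd2]
      calc unseenCount m n (pushStep (d2 :: rest, seen ++ [d2]) d3).2
          ≤ unseenCount m n (seen ++ [d2]) := unseenCount_pushStep_le m n _ d3
        _ < unseenCount m n seen := unseenCount_push_lt m n seen d2 h2 hd2
  · left
    rw [show pushStep (rest, seen) d1 = (d1 :: rest, seen ++ [d1]) from if_neg hd1]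
    calc unseenCount m n (pushStep (pushStep (d1 :: rest, seen ++ [d1]) d2) d3).2
        ≤ unseenCount m n (pushStep (d1 :: rest, seen ++ [d1]) d2).2 := unseenCount_pushStep_le m n _ d3
      _ ≤ unseenCount m n (seen ++ [d1]) := unseenCount_pushStep_le m n _ d2
      _ < unseenCount m n seen := unseenCount_push_lt m n seen d1 h1 hd1

-- the DFS while-loop: pop, record, expand unvisited dependencies.
-- The 'i <= m and j <= n' conjunct mirrors the Python guard; every cell ever
-- pushed satisfies it, and it also bounds the termination measure.
def dfsGen (m n : Nat) (stack seen order : List (Nat × Nat)) : List (Nat × Nat) :=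
  match stack with
  | [] => order
  | c :: rest =>
    if 0 < c.1 ∧ 0 < c.2 ∧ c.1 ≤ m ∧ c.2 ≤ n then
      let s1 := pushStep (rest, seen) (c.1 - 1, c.2 - 1)
      let s2 := pushStep s1 (c.1 - 1, c.2)
      let s3 := pushStep s2 (c.1, c.2 - 1)
      dfsGen m n s3.1 s3.2 (order ++ [c])
    else
      dfsGen m n rest seen (order ++ [c])
termination_by (unseenCount m n seen, stack.length)
decreasing_by
  · rename_i h
    rcases push3_dec m n rest seen (c.1 - 1, c.2 - 1) (c.1 - 1, c.2) (c.1, c.2 - 1)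
        ((mem_gridCells m n _ _).mpr (by omega)) ((mem_gridCells m n _ _).mpr (by omega))
        ((mem_gridCells m n _ _).mpr (by omega)) with hlt | heq
    · exact Prod.Lex.left _ _ hlt
    · rw [heq]
      exact Prod.Lex.right _ (by simp)
  · exact Prod.Lex.right _ (by simp)

-- one step of the evaluation pass: memo[(i, j)] = v for the next cell in order;
-- memo.getD _ 0 ports Python's memo[...]: the default is never read, every
-- dependency is evaluated earlier (proved below).
def evalCell (gp mp : Int) (xs ys : List Char) (memo : PySem.Dict (Nat × Nat) Int)
    (c : Nat × Nat) : PySem.Dict (Nat × Nat) Int :=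
  let v : Int :=
    if c.1 = 0 then (c.2 : Int) * gp
    else if c.2 = 0 then (c.1 : Int) * gp
    else min (min (memo.getD (c.1 - 1, c.2 - 1) 0 +
                     (if xs.getD (c.1 - 1) ' ' = ys.getD (c.2 - 1) ' ' then 0 else mp))
                  (memo.getD (c.1 - 1, c.2) 0 + gp))
             (memo.getD (c.1, c.2 - 1) 0 + gp)
  memo.insert c v

def gene_similarity_alt (gap_penalty : Int) (mismatch_penalty : Int) (x : String) (y : String) : Int :=
  let xs := x.toList
  let ys := y.toList
  let m := xs.length
  let n := ys.length
  let target : Nat × Nat := (m, n)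
  let order := dfsGen m n [target] [target] []
  -- order.sort(key=lambda c: c[0] + c[1])
  let sortedOrder := PySem.List.sorted order (fun c => c.1 + c.2) false
  let memo := sortedOrder.foldl (evalCell gap_penalty mismatch_penalty xs ys) PySem.Dict.empty
  memo.getD target 0

-- ===== PRECONDITION & SPEC =====
def Spec_gene_similarity (gap_penalty : Int) (mismatch_penalty : Int) (x : String) (y : String) (out : Int) : Prop := out = gene_similarity_alt gap_penalty mismatch_penalty x y
instance (gap_penalty : Int) (mismatch_penalty : Int) (x : String) (y : String) (out : Int) : Decidable (Spec_gene_similarity gap_penalty mismatch_penalty x y out) := by unfold Spec_gene_similarity; infer_instance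

-- ===== CLAIM (what is proved, stated in full; the proofs are below) =====
def Claim_equal_gene_similarity : Prop := ∀ (gap_penalty : Int) (mismatch_penalty : Int) (x : String) (y : String), Dom_gene_similarity gap_penalty mismatch_penalty x y → Spec_gene_similarity gap_penalty mismatch_penalty x y (gene_similarity gap_penalty mismatch_penalty x y)

-- ===== LEMMAS AND PROOFS =====

-- the alignment-cost recurrence both programs compute (proof-internal spec)
def E (gp mp : Int) (xs ys : List Char) : Nat → Nat → Int
  | 0, j => (j : Int) * gp
  | i+1, 0 => ((i : Int) + 1) * gp
  | i+1, j+1 => min (min (E gp mp xs ys i j + (if xs.getD i ' ' = ys.getD j ' ' then 0 else mp))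
                         (E gp mp xs ys i (j+1) + gp))
                    (E gp mp xs ys (i+1) j + gp)

-- ---- A-side: the DP rows A's table computes, and A's fold characterised ----
def buildRow (gp mp : Int) (cx : Char) : Int → Int → List Char → List Int → List Int
  | diag, last, cy :: ys, up :: rest =>
      let best := min (min (diag + (if cx = cy then 0 else mp)) (up + gp)) (last + gp)
      best :: buildRow gp mp cx up best ys rest
  | _, _, _, _ => []

def rowStep (gp mp : Int) (cx : Char) (ys : List Char) (prev : List Int) : List Int :=
  let d := prev.headD 0
  (d + gp) :: buildRow gp mp cx d (d + gp) ys prev.tail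

def initRow (gp : Int) (n : Nat) : List Int := (List.range (n+1)).map (fun (j : Nat) => (j : Int) * gp)

def F (gp mp : Int) (xs ys : List Char) (i : Nat) : List Int :=
  (xs.take i).foldl (fun p c => rowStep gp mp c ys p) (initRow gp ys.length)

theorem initRow_getD (gp : Int) (n j : Nat) (h : j ≤ n) :
    (initRow gp n).getD j 0 = (j : Int) * gp := by
  have hl : j < (initRow gp n).length := by
    simpa [initRow] using Nat.lt_succ_of_le h
  rw [List.getD_eq_getElem _ _ hl]
  simp [initRow]

theorem buildRow_length (gp mp : Int) (cx : Char) : ∀ (ys : List Char) (rest : List Int) (diag last : Int),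
    (buildRow gp mp cx diag last ys rest).length = min ys.length rest.length := by
  intro ys
  induction ys with
  | nil => intro rest diag last; cases rest <;> simp [buildRow]
  | cons cy ys ih =>
    intro rest diag last
    cases rest with
    | nil => simp [buildRow]
    | cons up rest' => simp [buildRow, ih, Nat.succ_min_succ]

theorem rowStep_length (gp mp : Int) (cx : Char) (ys : List Char) (prev : List Int)
    (h : prev.length = ys.length + 1) :
    (rowStep gp mp cx ys prev).length = ys.length + 1 := by
  cases prev with
  | nil => simp at h
  | cons p ps =>
    simp only [rowStep, List.headD_cons, List.tail_cons, List.length_cons, buildRow_length]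
    simp at h
    omega

theorem foldl_rowStep_length (gp mp : Int) (ys : List Char) :
    ∀ (l : List Char) (prev : List Int), prev.length = ys.length + 1 →
      (l.foldl (fun p c => rowStep gp mp c ys p) prev).length = ys.length + 1 := by
  intro l
  induction l with
  | nil => intro prev h; simpa using h
  | cons c l ih =>
    intro prev h
    rw [List.foldl_cons]
    exact ih _ (rowStep_length gp mp c ys prev h)

theorem F_length (gp mp : Int) (xs ys : List Char) (i : Nat) :
    (F gp mp xs ys i).length = ys.length + 1 :=
  foldl_rowStep_length gp mp ys _ _ (by simp [initRow])

theorem F_succ (gp mp : Int) (xs ys : List Char) (k : Nat) (h : k < xs.length) :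
    F gp mp xs ys (k+1) = rowStep gp mp (xs.getD k ' ') ys (F gp mp xs ys k) := by
  unfold F
  rw [List.take_add_one, List.foldl_append]
  have hx : xs[k]? = some xs[k] := List.getElem?_eq_getElem h
  rw [hx]
  simp [List.getD_eq_getElem?_getD, hx]

theorem headD_eq_getD (L : List Int) : L.headD 0 = L.getD 0 0 := by
  cases L <;> simp

theorem F_getD_zero (gp mp : Int) (xs ys : List Char) (k : Nat) (h : k ≤ xs.length) :
    (F gp mp xs ys k).getD 0 0 = (k : Int) * gp := by
  induction k with
  | zero => simpa using initRow_getD gp ys.length 0 (Nat.zero_le _)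
  | succ k ih =>
    rw [F_succ gp mp xs ys k (by omega)]
    simp only [rowStep, List.getD_cons_zero]
    rw [headD_eq_getD, ih (by omega)]
    push_cast
    ring

theorem buildRow_getD (gp mp : Int) (cx : Char) :
    ∀ (ys : List Char) (rest : List Int) (diag last : Int) (k : Nat),
      k < ys.length → k < rest.length →
      (buildRow gp mp cx diag last ys rest).getD k 0 =
        min (min ((diag :: rest).getD k 0 + (if cx = ys.getD k ' ' then 0 else mp))
                 (rest.getD k 0 + gp))
            ((last :: buildRow gp mp cx diag last ys rest).getD k 0 + gp) := by
  intro ys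
  induction ys with
  | nil => intro rest diag last k h1 h2; simp at h1
  | cons cy ys ih =>
    intro rest diag last k h1 h2
    cases rest with
    | nil => simp at h2
    | cons up rest' =>
      cases k with
      | zero => simp [buildRow]
      | succ k' =>
        simp only [buildRow, List.getD_cons_succ]
        have := ih rest' up (min (min (diag + (if cx = cy then 0 else mp)) (up + gp)) (last + gp)) k'
          (by simpa using h1) (by simpa using h2)
        simpa using this

theorem rowStep_getD_succ (gp mp : Int) (cx : Char) (ys : List Char) (R : List Int)
    (k : Nat) (hk : k < ys.length) (hR : k + 1 < R.length) :
    (rowStep gp mp cx ys R).getD (k+1) 0 =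
      min (min (R.getD k 0 + (if cx = ys.getD k ' ' then 0 else mp))
               (R.getD (k+1) 0 + gp))
          ((rowStep gp mp cx ys R).getD k 0 + gp) := by
  cases R with
  | nil => simp at hR
  | cons r0 rs =>
    simp only [rowStep, List.headD_cons, List.tail_cons, List.getD_cons_succ]
    have := buildRow_getD gp mp cx ys rs r0 (r0 + gp) k hk (by simpa using hR)
    cases k with
    | zero => simpa using this
    | succ k' => simpa using this

theorem tset_getD_eq (a : List (List Int)) (i j : Nat) (v : Int) (h : i < a.length) :
    (tset a i j v).getD i [] = (a.getD i []).set j v := by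
  simp [tset, List.getD_eq_getElem?_getD, h]

theorem tset_getD_ne (a : List (List Int)) (i j r : Nat) (v : Int) (h : i ≠ r) :
    (tset a i j v).getD r [] = a.getD r [] := by
  simp [tset, List.getD_eq_getElem?_getD, List.getElem?_set_ne h]

theorem foldl_tset_length (p q : Nat → Nat) (v : Nat → Int) :
    ∀ (l : List Nat) (a : List (List Int)),
      (l.foldl (fun a i => tset a (p i) (q i) (v i)) a).length = a.length := by
  intro l
  induction l with
  | nil => intro a; simp
  | cons x l ih => intro a; rw [List.foldl_cons, ih]; simp [tset]

-- effect of the column-0 initialisation loop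
theorem fold_col0 (gp : Int) :
    ∀ (c : Nat) (a : List (List Int)) (r : Nat), c ≤ a.length →
      ((List.range c).foldl (fun a i => tset a i 0 ((i : Int) * gp)) a).getD r [] =
        if r < c then (a.getD r []).set 0 ((r : Int) * gp) else a.getD r [] := by
  intro c
  induction c with
  | zero => intro a r h; simp
  | succ c ih =>
    intro a r h
    rw [List.range_succ, List.foldl_append]
    simp only [List.foldl_cons, List.foldl_nil]
    by_cases hr : r = c
    · subst hr
      have hlen : r < (List.foldl (fun a i => tset a i 0 ((i:Int) * gp)) a (List.range r)).length := by
        rw [foldl_tset_length (fun i => i) (fun _ => 0) (fun i => (i:Int)*gp) (List.range r) a]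
        omega
      rw [tset_getD_eq _ _ _ _ hlen, ih a r (by omega)]
      simp
    · rw [tset_getD_ne _ _ _ _ _ (fun hh => hr hh.symm), ih a r (by omega)]
      by_cases h2 : r < c
      · simp [h2, Nat.lt_succ_of_lt h2]
      · have : ¬ r < c + 1 := by omega
        simp [h2, this]

-- the row-0 initialisation loop leaves other rows alone …
theorem fold_row0_ne (gp : Int) (c : Nat) (a : List (List Int)) (r : Nat) (h : r ≠ 0) :
    ((List.range c).foldl (fun a j => tset a 0 j ((j : Int) * gp)) a).getD r [] = a.getD r [] := by
  induction c generalizing a with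
  | zero => simp
  | succ c ih =>
    rw [List.range_succ, List.foldl_append]
    simp only [List.foldl_cons, List.foldl_nil]
    rw [tset_getD_ne _ _ _ _ _ (fun hh => h hh.symm), ih a]

-- … and acts on row 0 as a fold of List.set over that row
theorem fold_row0_zero (gp : Int) (c : Nat) (a : List (List Int)) (h0 : 0 < a.length) :
    ((List.range c).foldl (fun a j => tset a 0 j ((j : Int) * gp)) a).getD 0 [] =
      (List.range c).foldl (fun l j => l.set j ((j : Int) * gp)) (a.getD 0 []) := by
  induction c generalizing a with
  | zero => simp
  | succ c ih =>
    rw [List.range_succ, List.foldl_append, List.foldl_append]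
    simp only [List.foldl_cons, List.foldl_nil]
    have hlen : 0 < (List.foldl (fun a j => tset a 0 j ((j:Int) * gp)) a (List.range c)).length := by
      rw [foldl_tset_length (fun _ => 0) (fun j => j) (fun j => (j:Int)*gp) (List.range c) a]
      exact h0
    rw [tset_getD_eq _ _ _ _ hlen, ih a h0]

theorem set_fold_row (gp : Int) :
    ∀ (c : Nat) (L : List Int), c ≤ L.length →
      ((List.range c).foldl (fun l j => l.set j ((j : Int) * gp)) L) =
        (List.range c).map (fun (j : Nat) => (j : Int) * gp) ++ L.drop c := by
  intro c
  induction c with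
  | zero => intro L h; simp
  | succ c ih =>
    intro L h
    rw [List.range_succ, List.foldl_append, List.map_append]
    simp only [List.foldl_cons, List.foldl_nil, List.map_cons, List.map_nil]
    rw [ih L (by omega)]
    have hc : c < L.length := by omega
    have hdrop : L.drop c = L[c] :: L.drop (c+1) := List.drop_eq_getElem_cons hc
    have hlenmap : ((List.range c).map (fun (j : Nat) => (j : Int) * gp)).length = c := by simp
    rw [hdrop, List.set_append, hlenmap]
    simp only [Nat.lt_irrefl, if_false, Nat.sub_self, List.set_cons_zero]
    simp

-- inner loop: starting from a partially-computed row i, the fold over the remaining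
-- columns completes row i to the rowStep of row (i-1), leaving other rows unchanged
theorem inner_loop (gp mp : Int) (xs ys : List Char) (i : Nat) (hi : 1 ≤ i) :
    ∀ (t k : Nat) (a : List (List Int)), k + t = ys.length → i < a.length →
      a.getD (i-1) [] = F gp mp xs ys (i-1) →
      a.getD i [] = (rowStep gp mp (xs.getD (i-1) ' ') ys (F gp mp xs ys (i-1))).take (k+1)
                      ++ List.replicate t 0 →
      (let a' := (List.range' (k+1) t).foldl (fun a j =>
          let match_penalty : Int := if xs.getD (i-1) ' ' = ys.getD (j-1) ' ' then 0 else mp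
          tset a i j (min (min (tget a (i-1) (j-1) + match_penalty)
                               (tget a (i-1) j + gp))
                          (tget a i (j-1) + gp))) a
       a'.getD i [] = rowStep gp mp (xs.getD (i-1) ' ') ys (F gp mp xs ys (i-1)) ∧
       (∀ r, r ≠ i → a'.getD r [] = a.getD r []) ∧ a'.length = a.length) := by
  intro t
  induction t with
  | zero =>
    intro k a hk hlen hprev hrow
    refine ⟨?_, fun r hr => rfl, rfl⟩
    have hC : (rowStep gp mp (xs.getD (i-1) ' ') ys (F gp mp xs ys (i-1))).length = ys.length + 1 :=
      rowStep_length _ _ _ _ _ (F_length gp mp xs ys (i-1))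
    simp only [List.range'_zero, List.foldl_nil]
    rw [hrow]
    have hle : (rowStep gp mp (xs.getD (i-1) ' ') ys (F gp mp xs ys (i-1))).length ≤ k + 1 := by omega
    rw [List.take_of_length_le hle, List.replicate_zero, List.append_nil]
  | succ t ih =>
    intro k a hk hlen hprev hrow
    set cx := xs.getD (i-1) ' ' with hcx
    set C := rowStep gp mp cx ys (F gp mp xs ys (i-1)) with hCdef
    have hClen : C.length = ys.length + 1 :=
      rowStep_length _ _ _ _ _ (F_length gp mp xs ys (i-1))
    have hRlen : (F gp mp xs ys (i-1)).length = ys.length + 1 := F_length gp mp xs ys (i-1)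
    have hkn : k < ys.length := by omega
    rw [List.range'_succ, List.foldl_cons]
    -- the value written at column k+1 is C.getD (k+1)
    have htake_len : (C.take (k+1)).length = k + 1 := by
      rw [List.length_take]; omega
    have hgetrow : ∀ jj, jj < k + 1 → (a.getD i []).getD jj 0 = C.getD jj 0 := by
      intro jj hjj
      rw [hrow, List.getD_append _ _ _ _ (by omega)]
      rw [List.getD_eq_getElem _ _ (by omega), List.getD_eq_getElem _ _ (by omega : jj < C.length)]
      simp [List.getElem_take]
    have hvm : tget a i ((k+1)-1) = C.getD k 0 := by
      simp only [tget, Nat.add_sub_cancel]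
      exact hgetrow k (by omega)
    have hvp : tget a (i-1) ((k+1)-1) = (F gp mp xs ys (i-1)).getD k 0 := by
      simp only [tget, Nat.add_sub_cancel, hprev]
    have hvq : tget a (i-1) (k+1) = (F gp mp xs ys (i-1)).getD (k+1) 0 := by
      simp only [tget, hprev]
    have hv : (min (min (tget a (i-1) ((k+1)-1) + (if cx = ys.getD ((k+1)-1) ' ' then 0 else mp))
                        (tget a (i-1) (k+1) + gp))
                   (tget a i ((k+1)-1) + gp)) = C.getD (k+1) 0 := by
      rw [hvm, hvp, hvq]
      rw [hCdef, rowStep_getD_succ gp mp cx ys _ k hkn (by omega)]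
      simp
    -- the updated table
    have hseteq : (tset a i (k+1) (C.getD (k+1) 0)).getD i [] = C.take (k+2) ++ List.replicate t 0 := by
      rw [tset_getD_eq _ _ _ _ hlen, hrow]
      rw [show List.replicate (t+1) (0:Int) = 0 :: List.replicate t 0 from rfl]
      rw [List.set_append, htake_len]
      simp only [Nat.lt_irrefl, if_false, Nat.sub_self, List.set_cons_zero]
      have : C.take (k+1) ++ C.getD (k+1) 0 :: List.replicate t 0
           = (C.take (k+1) ++ [C.getD (k+1) 0]) ++ List.replicate t 0 := by simp
      rw [this]
      congr 1
      have hx : C.take (k+2) = C.take (k+1) ++ [C.getD (k+1) 0] := by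
        rw [show k+2 = (k+1)+1 from rfl, List.take_add_one,
          List.getElem?_eq_getElem (by omega : k + 1 < C.length),
          List.getD_eq_getElem _ _ (by omega : k + 1 < C.length)]
        simp
      exact hx.symm
    have hstep := ih (k+1) (tset a i (k+1) (C.getD (k+1) 0)) (by omega)
      (by rw [show (tset a i (k+1) (C.getD (k+1) 0)).length = a.length by simp [tset]]; exact hlen)
      (by rw [tset_getD_ne _ _ _ _ _ (by omega : i ≠ i - 1)]; exact hprev)
      (by rw [hseteq])
    simp only at hstep
    obtain ⟨h1, h2, h3⟩ := hstep
    have hgs : (let match_penalty : Int := if cx = ys.getD ((k+1)-1) ' ' then 0 else mp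
                tset a i (k+1) (min (min (tget a (i-1) ((k+1)-1) + match_penalty)
                     (tget a (i-1) (k+1) + gp)) (tget a i ((k+1)-1) + gp)))
             = tset a i (k+1) (C.getD (k+1) 0) := by
      simp only
      rw [hv]
    rw [hgs]
    refine ⟨h1, ?_, ?_⟩
    · intro r hr
      rw [h2 r hr, tset_getD_ne _ _ _ _ _ (fun hh => hr hh.symm)]
    · rw [h3]
      simp [tset]

theorem outer_loop (gp mp : Int) (xs ys : List Char) :
    ∀ (t k : Nat) (a : List (List Int)), k + t = xs.length → a.length = xs.length + 1 →
      a.getD k [] = F gp mp xs ys k →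
      (∀ r, k + 1 ≤ r → r ≤ xs.length → a.getD r [] = ((r : Int) * gp) :: List.replicate ys.length 0) →
      ((List.range' (k+1) t).foldl (fun a i =>
        (List.range' 1 ys.length).foldl (fun a j =>
          let match_penalty : Int := if xs.getD (i-1) ' ' = ys.getD (j-1) ' ' then 0 else mp
          tset a i j (min (min (tget a (i-1) (j-1) + match_penalty)
                               (tget a (i-1) j + gp))
                          (tget a i (j-1) + gp))) a) a).getD xs.length []
        = F gp mp xs ys xs.length := by
  intro t
  induction t with
  | zero =>
    intro k a hk hlen hcur hinit
    have : k = xs.length := by omega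
    subst this
    simpa using hcur
  | succ t ih =>
    intro k a hk hlen hcur hinit
    rw [List.range'_succ, List.foldl_cons]
    have hkx : k < xs.length := by omega
    have hinner := inner_loop gp mp xs ys (k+1) (by omega) ys.length 0 a (by omega) (by omega)
      (by simpa using hcur)
      ?_
    · simp only at hinner
      obtain ⟨h1, h2, h3⟩ := hinner
      simp only [Nat.add_sub_cancel, Nat.zero_add] at h1 h2 h3
      refine ih (k+1) _ (by omega)
        (by simp only [Nat.add_sub_cancel]; rw [h3]; exact hlen) ?_ ?_
      · simp only [Nat.add_sub_cancel]
        rw [h1, ← F_succ gp mp xs ys k hkx]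
      · intro r hr1 hr2
        simp only [Nat.add_sub_cancel]
        rw [h2 r (by omega)]
        exact hinit r (by omega) hr2
    · -- the freshly-initialised row k+1 is the one-element prefix of the next DP row
      rw [hinit (k+1) (by omega) (by omega)]
      have hd : (rowStep gp mp (xs.getD k ' ') ys (F gp mp xs ys k)).take 1
              = [(F gp mp xs ys k).headD 0 + gp] := rfl
      have hd2 : (F gp mp xs ys k).headD 0 + gp = ((k:Int)+1) * gp := by
        rw [headD_eq_getD, F_getD_zero gp mp xs ys k (by omega)]
        ring
      simp only [Nat.add_sub_cancel]
      rw [hd, hd2]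
      push_cast
      simp

-- A's table computation, written out, equals row m of the DP-row sequence at column n
theorem tableA_final (gp mp : Int) (xs ys : List Char) :
    tget ((List.range' 1 xs.length).foldl (fun a i =>
        (List.range' 1 ys.length).foldl (fun a j =>
          let match_penalty : Int := if xs.getD (i-1) ' ' = ys.getD (j-1) ' ' then 0 else mp
          tset a i j (min (min (tget a (i-1) (j-1) + match_penalty)
                               (tget a (i-1) j + gp))
                          (tget a i (j-1) + gp))) a)
      ((List.range (ys.length+1)).foldl (fun a j => tset a 0 j ((j : Int) * gp))
        ((List.range (xs.length+1)).foldl (fun a i => tset a i 0 ((i : Int) * gp))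
          ((List.range (xs.length+1)).map (fun _ => (List.range (ys.length+1)).map (fun _ => (0:Int)))))))
      xs.length ys.length
    = (F gp mp xs ys xs.length).getD ys.length 0 := by
  set m := xs.length
  set n := ys.length
  set A0 := (List.range (m+1)).map (fun _ => (List.range (n+1)).map (fun _ => (0:Int))) with hA0def
  set A1 := (List.range (m+1)).foldl (fun a i => tset a i 0 ((i : Int) * gp)) A0 with hA1def
  set A2 := (List.range (n+1)).foldl (fun a j => tset a 0 j ((j : Int) * gp)) A1 with hA2def
  have ha0len : A0.length = m + 1 := by simp [hA0def]
  have ha0 : ∀ r, r ≤ m → A0.getD r [] = List.replicate (n+1) (0:Int) := by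
    intro r hr
    have hl : r < A0.length := by omega
    rw [List.getD_eq_getElem _ _ hl]
    simp [hA0def]
  have ha1len : A1.length = m + 1 := by
    rw [hA1def, foldl_tset_length (fun i => i) (fun _ => 0) (fun i => (i:Int)*gp)]
    exact ha0len
  have ha1 : ∀ r, r ≤ m → A1.getD r [] = ((r:Int) * gp) :: List.replicate n 0 := by
    intro r hr
    rw [hA1def, fold_col0 gp (m+1) A0 r (by omega), if_pos (by omega), ha0 r hr,
      List.replicate_succ, List.set_cons_zero]
  have ha2len : A2.length = m + 1 := by
    rw [hA2def, foldl_tset_length (fun _ => 0) (fun j => j) (fun j => (j:Int)*gp)]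
    exact ha1len
  have ha2_0 : A2.getD 0 [] = initRow gp n := by
    rw [hA2def, fold_row0_zero gp (n+1) A1 (by omega), ha1 0 (Nat.zero_le m),
      set_fold_row gp (n+1) _ (by simp)]
    rw [List.drop_of_length_le (by simp)]
    simp [initRow]
  have ha2 : ∀ r, 1 ≤ r → r ≤ m → A2.getD r [] = ((r:Int) * gp) :: List.replicate n 0 := by
    intro r hr1 hr2
    rw [hA2def, fold_row0_ne gp (n+1) A1 r (by omega)]
    exact ha1 r hr2
  have houter := outer_loop gp mp xs ys m 0 A2 (by omega) ha2len
    (by rw [ha2_0]; rfl) (fun r hr1 hr2 => ha2 r hr1 hr2)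
  simp only [Nat.zero_add] at houter
  exact congrArg (fun L => List.getD L n 0) houter

-- ---- bridge: A's DP rows compute the recurrence E ----
theorem F_eq_E (gp mp : Int) (xs ys : List Char) :
    ∀ i, i ≤ xs.length → ∀ j, j ≤ ys.length →
      (F gp mp xs ys i).getD j 0 = E gp mp xs ys i j := by
  intro i
  induction i with
  | zero =>
    intro _ j hj
    unfold F
    simp only [List.take_zero, List.foldl_nil]
    rw [initRow_getD gp ys.length j hj]
    simp [E]
  | succ i ih =>
    intro hi j
    induction j with
    | zero =>
      intro _
      rw [F_getD_zero gp mp xs ys (i+1) hi]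
      simp only [E]
      push_cast
      ring
    | succ j ihj =>
      intro hj
      rw [F_succ gp mp xs ys i (by omega)]
      rw [rowStep_getD_succ gp mp _ ys _ j (by omega) (by rw [F_length]; omega)]
      rw [← F_succ gp mp xs ys i (by omega)]
      rw [ihj (by omega), ih (by omega) j (by omega), ih (by omega) (j+1) (by omega)]
      simp [E]

-- ---- B-side: what the DFS worklist produces ----
theorem pushStep_seen_mono (s : List (Nat × Nat) × List (Nat × Nat)) (d e : Nat × Nat)
    (h : e ∈ s.2) : e ∈ (pushStep s d).2 := by
  unfold pushStep; split
  · exact h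
  · simp [h]

theorem pushStep_mem_self (s : List (Nat × Nat) × List (Nat × Nat)) (d : Nat × Nat) :
    d ∈ (pushStep s d).2 := by
  unfold pushStep; split
  · assumption
  · simp

theorem pushStep_inv1 (s : List (Nat × Nat) × List (Nat × Nat)) (d : Nat × Nat)
    (O : List (Nat × Nat)) (h : ∀ e ∈ s.2, e ∈ O ∨ e ∈ s.1) :
    ∀ e ∈ (pushStep s d).2, e ∈ O ∨ e ∈ (pushStep s d).1 := by
  unfold pushStep; split
  · exact h
  · intro e he
    simp only [List.mem_append, List.mem_singleton] at he
    rcases he with he | rfl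
    · rcases h e he with h' | h'
      · exact Or.inl h'
      · exact Or.inr (by simp [h'])
    · exact Or.inr (by simp)

theorem pushStep_inv2 (s : List (Nat × Nat) × List (Nat × Nat)) (d : Nat × Nat)
    (P : Nat × Nat → Prop) (h : ∀ e ∈ s.2, P e) (hd : P d) :
    ∀ e ∈ (pushStep s d).2, P e := by
  unfold pushStep; split
  · exact h
  · intro e he
    simp only [List.mem_append, List.mem_singleton] at he
    rcases he with he | rfl
    · exact h e he
    · exact hd

theorem pushStep_inv3 (s : List (Nat × Nat) × List (Nat × Nat)) (d : Nat × Nat)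
    (h : ∀ e ∈ s.1, e ∈ s.2) : ∀ e ∈ (pushStep s d).1, e ∈ (pushStep s d).2 := by
  unfold pushStep; split
  · exact h
  · intro e he
    simp only [List.mem_cons] at he
    rcases he with rfl | he
    · simp
    · simp [h e he]

theorem dfsGen_spec (m n : Nat) (stack seen order : List (Nat × Nat))
    (h1 : ∀ c ∈ seen, c ∈ order ∨ c ∈ stack)
    (h2 : ∀ c ∈ seen, c.1 ≤ m ∧ c.2 ≤ n)
    (h3 : ∀ c ∈ stack, c ∈ seen)
    (h4 : ∀ c ∈ order, c ∈ seen)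
    (h5 : ∀ c ∈ order, 0 < c.1 ∧ 0 < c.2 →
      ((c.1-1, c.2-1) ∈ seen ∧ (c.1-1, c.2) ∈ seen ∧ (c.1, c.2-1) ∈ seen)) :
    (∀ c ∈ seen, c ∈ dfsGen m n stack seen order) ∧
    (∀ c ∈ dfsGen m n stack seen order, 0 < c.1 ∧ 0 < c.2 →
      ((c.1-1, c.2-1) ∈ dfsGen m n stack seen order ∧
       (c.1-1, c.2) ∈ dfsGen m n stack seen order ∧
       (c.1, c.2-1) ∈ dfsGen m n stack seen order)) := by
  induction stack, seen, order using dfsGen.induct m n with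
  | case1 seen order =>
    rw [dfsGen]
    constructor
    · intro c hc
      rcases h1 c hc with h | h
      · exact h
      · simp at h
    · intro c hc hnb
      obtain ⟨d1, d2, d3⟩ := h5 c hc hnb
      refine ⟨?_, ?_, ?_⟩
      · rcases h1 _ d1 with h | h
        · exact h
        · simp at h
      · rcases h1 _ d2 with h | h
        · exact h
        · simp at h
      · rcases h1 _ d3 with h | h
        · exact h
        · simp at h
  | case2 seen order c rest hguard ls1 ls2 ls3 ih =>
    rw [dfsGen, if_pos hguard]
    set s1 := pushStep (rest, seen) (c.1 - 1, c.2 - 1) with hs1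
    set s2 := pushStep s1 (c.1 - 1, c.2) with hs2
    set s3 := pushStep s2 (c.1, c.2 - 1) with hs3
    have hmono : ∀ e ∈ seen, e ∈ s3.2 := fun e he =>
      pushStep_seen_mono s2 _ e (pushStep_seen_mono s1 _ e (pushStep_seen_mono (rest, seen) _ e he))
    have hd1 : (c.1 - 1, c.2 - 1) ∈ s3.2 :=
      pushStep_seen_mono s2 _ _ (pushStep_seen_mono s1 _ _ (pushStep_mem_self (rest, seen) _))
    have hd2 : (c.1 - 1, c.2) ∈ s3.2 :=
      pushStep_seen_mono s2 _ _ (pushStep_mem_self s1 _)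
    have hd3 : (c.1, c.2 - 1) ∈ s3.2 := pushStep_mem_self s2 _
    have hc_seen : c ∈ seen := h3 c (by simp)
    have g1 : ∀ e ∈ s3.2, e ∈ (order ++ [c]) ∨ e ∈ s3.1 :=
      pushStep_inv1 s2 _ _ (pushStep_inv1 s1 _ _ (pushStep_inv1 (rest, seen) _ _ (by
        intro e he
        rcases h1 e he with h | h
        · exact Or.inl (by simp [h])
        · simp only [List.mem_cons] at h
          rcases h with rfl | h
          · exact Or.inl (by simp)
          · exact Or.inr h)))
    have g2 : ∀ e ∈ s3.2, e.1 ≤ m ∧ e.2 ≤ n :=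
      pushStep_inv2 s2 _ _ (pushStep_inv2 s1 _ _ (pushStep_inv2 (rest, seen) _ _ h2
        (by simp only; omega)) (by simp only; omega)) (by simp only; omega)
    have g3 : ∀ e ∈ s3.1, e ∈ s3.2 :=
      pushStep_inv3 s2 _ (pushStep_inv3 s1 _ (pushStep_inv3 (rest, seen) _ (by
        intro e he
        exact h3 e (by simp [he]))))
    have g4 : ∀ e ∈ order ++ [c], e ∈ s3.2 := by
      intro e he
      simp only [List.mem_append, List.mem_singleton] at he
      rcases he with he | rfl
      · exact hmono e (h4 e he)
      · exact hmono e hc_seen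
    have g5 : ∀ e ∈ order ++ [c], 0 < e.1 ∧ 0 < e.2 →
        ((e.1-1, e.2-1) ∈ s3.2 ∧ (e.1-1, e.2) ∈ s3.2 ∧ (e.1, e.2-1) ∈ s3.2) := by
      intro e he hnb
      simp only [List.mem_append, List.mem_singleton] at he
      rcases he with he | rfl
      · obtain ⟨a1, a2, a3⟩ := h5 e he hnb
        exact ⟨hmono _ a1, hmono _ a2, hmono _ a3⟩
      · exact ⟨hd1, hd2, hd3⟩
    obtain ⟨k1, k2⟩ := ih g1 g2 g3 g4 g5
    exact ⟨fun e he => k1 e (hmono e he), k2⟩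
  | case3 seen order c rest hguard ih =>
    rw [dfsGen, if_neg hguard]
    have g1 : ∀ e ∈ seen, e ∈ order ++ [c] ∨ e ∈ rest := by
      intro e he
      rcases h1 e he with h | h
      · exact Or.inl (by simp [h])
      · simp only [List.mem_cons] at h
        rcases h with rfl | h
        · exact Or.inl (by simp)
        · exact Or.inr h
    have hc_seen : c ∈ seen := h3 c (by simp)
    have g5 : ∀ e ∈ order ++ [c], 0 < e.1 ∧ 0 < e.2 →
        ((e.1-1, e.2-1) ∈ seen ∧ (e.1-1, e.2) ∈ seen ∧ (e.1, e.2-1) ∈ seen) := by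
      intro e he hnb
      simp only [List.mem_append, List.mem_singleton] at he
      rcases he with he | rfl
      · exact h5 e he hnb
      · exact absurd ⟨hnb.1, hnb.2, (h2 e hc_seen).1, (h2 e hc_seen).2⟩ hguard
    exact ih g1 h2 (fun e he => h3 e (by simp [he]))
      (fun e he => by
        simp only [List.mem_append, List.mem_singleton] at he
        rcases he with he | rfl
        · exact h4 e he
        · exact hc_seen)
      g5

-- ---- B-side: the evaluation pass computes E on every discovered cell ----
theorem eval_fold (gp mp : Int) (xs ys : List Char) :
    ∀ (todo P : List (Nat × Nat)) (memo : PySem.Dict (Nat × Nat) Int),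
      (∀ c ∈ P, memo.get? c = some (E gp mp xs ys c.1 c.2)) →
      (∀ c ∈ todo, 0 < c.1 ∧ 0 < c.2 →
        (((c.1-1, c.2-1) ∈ P ∨ (c.1-1, c.2-1) ∈ todo) ∧
         ((c.1-1, c.2) ∈ P ∨ (c.1-1, c.2) ∈ todo) ∧
         ((c.1, c.2-1) ∈ P ∨ (c.1, c.2-1) ∈ todo))) →
      todo.Pairwise (fun a b => a.1 + a.2 ≤ b.1 + b.2) →
      ∀ c, (c ∈ P ∨ c ∈ todo) →
        (todo.foldl (evalCell gp mp xs ys) memo).get? c = some (E gp mp xs ys c.1 c.2) := by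
  intro todo
  induction todo with
  | nil =>
    intro P memo hmemo _ _ c hc
    rcases hc with hc | hc
    · simpa using hmemo c hc
    · simp at hc
  | cons c0 todo ih =>
    intro P memo hmemo hdeps hpair c hc
    -- the value written for c0 is E at c0
    have hdep_in_P : 0 < c0.1 ∧ 0 < c0.2 →
        ((c0.1-1, c0.2-1) ∈ P ∧ (c0.1-1, c0.2) ∈ P ∧ (c0.1, c0.2-1) ∈ P) := by
      intro hnb
      have hlt : ∀ e ∈ todo, c0.1 + c0.2 ≤ e.1 + e.2 := (List.pairwise_cons.mp hpair).1
      obtain ⟨a1, a2, a3⟩ := hdeps c0 (by simp) hnb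
      refine ⟨?_, ?_, ?_⟩
      · rcases a1 with h | h
        · exact h
        · simp only [List.mem_cons] at h
          rcases h with h | h
          · exfalso; rw [Prod.ext_iff] at h; dsimp only at h; omega
          · exfalso; have := hlt _ h; dsimp only at this; omega
      · rcases a2 with h | h
        · exact h
        · simp only [List.mem_cons] at h
          rcases h with h | h
          · exfalso; rw [Prod.ext_iff] at h; dsimp only at h; omega
          · exfalso; have := hlt _ h; dsimp only at this; omega
      · rcases a3 with h | h
        · exact h
        · simp only [List.mem_cons] at h
          rcases h with h | h
          · exfalso; rw [Prod.ext_iff] at h; dsimp only at h; omega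
          · exfalso; have := hlt _ h; dsimp only at this; omega
    have hval : evalCell gp mp xs ys memo c0 =
        memo.insert c0 (E gp mp xs ys c0.1 c0.2) := by
      unfold evalCell
      obtain ⟨a, b⟩ := c0
      dsimp only
      by_cases ha : a = 0
      · subst ha
        rw [if_pos rfl]
        have hE : E gp mp xs ys 0 b = (b : Int) * gp := by simp [E]
        rw [hE]
      · rw [if_neg ha]
        by_cases hb : b = 0
        · subst hb
          rw [if_pos rfl]
          obtain ⟨i, rfl⟩ := Nat.exists_eq_succ_of_ne_zero ha
          have hE : E gp mp xs ys (i+1) 0 = ((i+1 : Nat) : Int) * gp := by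
            simp only [E]
            push_cast
            ring
          rw [hE]
        · rw [if_neg hb]
          obtain ⟨i, rfl⟩ := Nat.exists_eq_succ_of_ne_zero ha
          obtain ⟨j, rfl⟩ := Nat.exists_eq_succ_of_ne_zero hb
          obtain ⟨b1, b2, b3⟩ := hdep_in_P (by constructor <;> omega)
          have e1 := hmemo _ b1
          have e2 := hmemo _ b2
          have e3 := hmemo _ b3
          rw [PySem.Dict.getD_eq_get?_getD, PySem.Dict.getD_eq_get?_getD,
            PySem.Dict.getD_eq_get?_getD]
          dsimp only at e1 e2 e3 ⊢
          rw [e1, e2, e3]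
          simp [E]
    rw [List.foldl_cons, hval]
    apply ih (c0 :: P)
    · intro e he
      rw [PySem.Dict.get?_insert]
      by_cases hec : e = c0
      · subst hec; simp
      · rw [if_neg hec]
        simp only [List.mem_cons] at he
        rcases he with rfl | he
        · exact absurd rfl hec
        · exact hmemo e he
    · intro e he hnb
      obtain ⟨a1, a2, a3⟩ := hdeps e (by simp [he]) hnb
      refine ⟨?_, ?_, ?_⟩
      · rcases a1 with h | h
        · exact Or.inl (by simp [h])
        · simp only [List.mem_cons] at h
          rcases h with h | h
          · exact Or.inl (by simp [h])
          · exact Or.inr h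
      · rcases a2 with h | h
        · exact Or.inl (by simp [h])
        · simp only [List.mem_cons] at h
          rcases h with h | h
          · exact Or.inl (by simp [h])
          · exact Or.inr h
      · rcases a3 with h | h
        · exact Or.inl (by simp [h])
        · simp only [List.mem_cons] at h
          rcases h with h | h
          · exact Or.inl (by simp [h])
          · exact Or.inr h
    · exact (List.pairwise_cons.mp hpair).2
    · rcases hc with hc | hc
      · exact Or.inl (by simp [hc])
      · simp only [List.mem_cons] at hc
        rcases hc with rfl | hc
        · exact Or.inl (by simp)
        · exact Or.inr hc

theorem alt_eq_E (gp mp : Int) (x y : String) :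
    gene_similarity_alt gp mp x y
      = E gp mp x.toList y.toList x.toList.length y.toList.length := by
  unfold gene_similarity_alt
  simp only
  set xs := x.toList
  set ys := y.toList
  set m := xs.length with hm
  set n := ys.length with hn
  have hdfs := dfsGen_spec m n [(m, n)] [(m, n)] []
    (by intro c hc; right; simpa using hc)
    (by intro c hc; simp only [List.mem_singleton] at hc; subst hc; exact ⟨le_refl _, le_refl _⟩)
    (by intro c hc; exact hc)
    (by intro c hc; simp at hc)
    (by intro c hc; simp at hc)
  obtain ⟨hseen, hclosed⟩ := hdfs
  set order := dfsGen m n [(m, n)] [(m, n)] [] with horder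
  have ht : (m, n) ∈ order := hseen (m, n) (by simp)
  set S := PySem.List.sorted order (fun c => c.1 + c.2) false with hS
  have hmemS : ∀ c : Nat × Nat, c ∈ S ↔ c ∈ order := fun c => PySem.List.mem_sorted order (fun c => c.1 + c.2) false c
  have hpair : S.Pairwise (fun a b => a.1 + a.2 ≤ b.1 + b.2) := PySem.List.sorted_pairwise order (fun c => c.1 + c.2)
  have hfold := eval_fold gp mp xs ys S [] PySem.Dict.empty
    (by intro c hc; simp at hc)
    (by
      intro c hc hnb
      obtain ⟨a1, a2, a3⟩ := hclosed c ((hmemS c).mp hc) hnb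
      exact ⟨Or.inr ((hmemS _).mpr a1), Or.inr ((hmemS _).mpr a2), Or.inr ((hmemS _).mpr a3)⟩)
    hpair (m, n) (Or.inr ((hmemS _).mpr ht))
  rw [PySem.Dict.getD_eq_get?_getD, hfold]
  rfl

-- ===== VERDICT (by name: the statement is the Claim_ definition above) =====
theorem gene_similarity_spec : Claim_equal_gene_similarity := by
  intro gp mp x y _
  unfold Spec_gene_similarity
  calc gene_similarity gp mp x y
      = (F gp mp x.toList y.toList x.toList.length).getD y.toList.length 0 :=
        tableA_final gp mp x.toList y.toList
    _ = E gp mp x.toList y.toList x.toList.length y.toList.length :=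
        F_eq_E gp mp x.toList y.toList _ (le_refl _) _ (le_refl _)
    _ = gene_similarity_alt gp mp x y := (alt_eq_E gp mp x y).symm
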